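-- pv_equiv track=rewrite | github.com/osaarima/readRuuvi | readRuuvi.py | findUnit
-- ===== SOURCE A (Python) =====
-- def findUnit(strNum):
--     pos = -1
--     posNow = 0
--     sUnit = ''
--     for iLetter in strNum:
--         if not iLetter.isnumeric():
--             if iLetter!='.':
--                 sUnit += iLetter
--                 if pos==-1:
--                     pos=posNow
--         posNow+=1
--
--     return (pos, sUnit)
-- ===== SOURCE B (Python) =====
-- def findUnit(strNum):
--     # Divide and conquer: the answer for a string is the monoid-combine of the
--     # answers for its two halves (left position wins if present; units concatenate).
--     def go(s, off):
--         n = len(s)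
--         if n == 0:
--             return (-1, '')
--         if n == 1:
--             if s.isnumeric() or s == '.':
--                 return (-1, '')
--             return (off, s)
--         mid = n // 2
--         pl, ul = go(s[:mid], off)
--         pr, ur = go(s[mid:], off + mid)
--         return (pl if pl != -1 else pr, ul + ur)
--     return go(strNum, 0)
-- ===== Notes on version B (the rewrite author's own statement) =====
-- stated objective: alternative
-- what changed: Replaces A's single left-to-right fused loop carrying pos/posNow/sentinel state with a divide-and-conquer recursion: the string is split in half, each half solved independently, and the two (position, unit) answers are combined monoidally (leftmost position wins, units concatenate).
import Mathlib
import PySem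

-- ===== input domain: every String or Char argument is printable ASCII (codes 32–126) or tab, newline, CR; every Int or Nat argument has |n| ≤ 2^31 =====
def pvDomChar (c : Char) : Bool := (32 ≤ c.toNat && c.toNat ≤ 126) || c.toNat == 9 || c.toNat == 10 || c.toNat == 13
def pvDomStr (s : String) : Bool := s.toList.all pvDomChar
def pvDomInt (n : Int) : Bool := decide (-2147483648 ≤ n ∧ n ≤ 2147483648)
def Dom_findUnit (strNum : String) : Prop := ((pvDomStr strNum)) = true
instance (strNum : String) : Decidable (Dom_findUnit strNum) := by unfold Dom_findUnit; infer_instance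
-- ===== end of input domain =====

-- B replaces A's fused left-to-right loop by a divide-and-conquer recursion on string
-- halves with a monoidal combine; alternative decomposition, return values agree on Dom.


-- ===== PORT A =====
-- iLetter.isnumeric() ported as PySem.Chars.isdigit: exact on the printable-ASCII domain,
-- where the only numeric characters are '0'..'9'.
-- the for loop, carrying (pos, posNow, sUnit) exactly as A does
def findUnitLoopA : List Char → Int → Int → List Char → Int × List Char
  | [], pos, _, sUnit => (pos, sUnit)
  | c :: rest, pos, posNow, sUnit =>
    if ¬ (PySem.Chars.isdigit c) then
      if c ≠ '.' then
        findUnitLoopA rest (if pos = -1 then posNow else pos) (posNow + 1) (sUnit ++ [c])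
      else
        findUnitLoopA rest pos (posNow + 1) sUnit
    else
      findUnitLoopA rest pos (posNow + 1) sUnit

def findUnit (strNum : String) : Int × String :=
  let r := findUnitLoopA strNum.toList (-1) 0 []
  (r.1, String.mk r.2)

-- ===== PORT B =====
-- c.isnumeric() again ported as PySem.Chars.isdigit (exact on ASCII)
def unitChar (c : Char) : Bool := ¬ (PySem.Chars.isdigit c) && c ≠ '.'

-- go(s, off): divide-and-conquer on the half-split of the string (as its char list)
def findUnitGo : List Char → Int → Int × List Char
  | [], _ => (-1, [])
  | [c], off => if unitChar c then (off, [c]) else (-1, [])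
  | c :: d :: rest, off =>
      let mid := (c :: d :: rest).length / 2
      let r1 := findUnitGo ((c :: d :: rest).take mid) off
      let r2 := findUnitGo ((c :: d :: rest).drop mid) (off + (mid : Int))
      ((if r1.1 ≠ -1 then r1.1 else r2.1), r1.2 ++ r2.2)
termination_by l _ => l.length
decreasing_by
  · simp [List.length_take]; omega
  · simp [List.length_drop]; omega

def findUnit_alt (strNum : String) : Int × String :=
  let r := findUnitGo strNum.toList 0
  (r.1, String.mk r.2)

-- ===== PRECONDITION & SPEC =====
def Spec_findUnit (strNum : String) (out : Int × String) : Prop := out = findUnit_alt strNum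
instance (strNum : String) (out : Int × String) : Decidable (Spec_findUnit strNum out) := by unfold Spec_findUnit; infer_instance

-- ===== CLAIM (what is proved, stated in full; the proofs are below) =====
def Claim_equal_findUnit : Prop := ∀ (strNum : String), Dom_findUnit strNum → Spec_findUnit strNum (findUnit strNum)

-- ===== LEMMAS AND PROOFS =====

-- canonical value both ports are shown to compute
def findUnitRef (l : List Char) (off : Int) : Int × List Char :=
  ((match l.findIdx? unitChar with
    | some i => off + (i : Int)
    | none => -1),
   l.filter unitChar)

lemma findUnitLoopA_eq (l : List Char) : ∀ (pos posNow : Int) (su : List Char),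
    (pos = -1 ∨ 0 ≤ pos) → 0 ≤ posNow →
    findUnitLoopA l pos posNow su =
      ((if pos = -1 then (findUnitRef l posNow).1 else pos),
       su ++ (findUnitRef l posNow).2) := by
  induction l with
  | nil => intro pos posNow su _ _; simp [findUnitLoopA, findUnitRef]
  | cons c rest ih =>
    intro pos posNow su hpos hnow
    by_cases hu : unitChar c = true
    · have h1 : ¬ (PySem.Chars.isdigit c) := by
        simp [unitChar] at hu; exact by simp [hu.1]
      have h2 : c ≠ '.' := by simp [unitChar] at hu; exact hu.2
      rw [findUnitLoopA]
      simp only [findUnitRef, h1, h2, if_true, ite_not, List.findIdx?_cons, hu,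
        List.filter_cons_of_pos hu, if_false]
      by_cases hp : pos = -1
      · rw [if_pos hp, ih posNow (posNow+1) (su ++ [c]) (Or.inr hnow) (by omega)]
        have : ¬ (posNow = -1) := by omega
        simp [hp, this, findUnitRef]
      · have hge : 0 ≤ pos := hpos.resolve_left hp
        rw [if_neg hp, ih pos (posNow+1) (su ++ [c]) (Or.inr hge) (by omega)]
        simp [hp, findUnitRef]
    · have hcase : PySem.Chars.isdigit c = true ∨ c = '.' := by
        simp [unitChar] at hu
        by_cases hd : PySem.Chars.isdigit c = true
        · left; exact hd
        · right; exact hu (by simpa using hd)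
      have hstep : findUnitLoopA (c :: rest) pos posNow su = findUnitLoopA rest pos (posNow + 1) su := by
        rcases hcase with hd | hdot
        · rw [findUnitLoopA]; simp [hd]
        · rw [findUnitLoopA]; simp [hdot]
      rw [hstep, ih _ _ _ hpos (by omega)]
      simp only [findUnitRef, List.findIdx?_cons, hu, List.filter_cons_of_neg (by simpa using hu)]
      by_cases hp : pos = -1
      · simp only [hp, if_true]
        cases h : rest.findIdx? unitChar with
        | none => simp
        | some i =>
          simp only [Option.map_some]
          push_cast
          ring_nf
      · simp [hp]

lemma findUnitRef_append (l₁ l₂ : List Char) (off : Int) (hoff : 0 ≤ off) :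
    findUnitRef (l₁ ++ l₂) off =
      ((if (findUnitRef l₁ off).1 ≠ -1 then (findUnitRef l₁ off).1
        else (findUnitRef l₂ (off + (l₁.length : Int))).1),
       (findUnitRef l₁ off).2 ++ (findUnitRef l₂ (off + (l₁.length : Int))).2) := by
  simp only [findUnitRef, List.filter_append, List.findIdx?_append]
  cases h1 : l₁.findIdx? unitChar with
  | some i =>
    have : 0 ≤ off + (i : Int) := by positivity
    simp; omega
  | none =>
    simp only [Option.none_or]
    cases h2 : l₂.findIdx? unitChar with
    | none => simp
    | some j => simp; ring

lemma findUnitGo_eq_aux : ∀ (n : Nat) (l : List Char), l.length = n → ∀ (off : Int), 0 ≤ off →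
    findUnitGo l off = findUnitRef l off := by
  intro n
  induction n using Nat.strong_induction_on with
  | _ n ih =>
    intro l hl off hoff
    match l with
    | [] => simp [findUnitGo, findUnitRef]
    | [c] =>
      by_cases hu : unitChar c = true
      · simp [findUnitGo, findUnitRef, hu]
      · simp [findUnitGo, findUnitRef, hu, List.findIdx?_cons,
          List.filter_cons_of_neg (by simpa using hu)]
    | c :: d :: rest =>
      rw [findUnitGo]
      simp only [List.length_cons] at hl ⊢
      have hmidlt : (rest.length + 1 + 1) / 2 < n := by omega
      have hmidpos : 1 ≤ (rest.length + 1 + 1) / 2 := by omega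
      set mid := (rest.length + 1 + 1) / 2 with hmid
      have h1 : findUnitGo ((c :: d :: rest).take mid) off =
          findUnitRef ((c :: d :: rest).take mid) off := by
        apply ih _ (by simp [List.length_take, List.length_cons]; omega) _ rfl _ hoff
      have h2 : findUnitGo ((c :: d :: rest).drop mid) (off + (mid : Int)) =
          findUnitRef ((c :: d :: rest).drop mid) (off + (mid : Int)) := by
        apply ih _ (by simp [List.length_drop, List.length_cons]; omega) _ rfl _ (by positivity)
      simp only [h1, h2]
      have happ := findUnitRef_append ((c :: d :: rest).take mid)
        ((c :: d :: rest).drop mid) off hoff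
      rw [List.take_append_drop] at happ
      rw [happ]
      have hlen : ((c :: d :: rest).take mid).length = mid := by
        simp [List.length_take, List.length_cons]; omega
      rw [hlen]

lemma findUnitGo_eq (l : List Char) (off : Int) (hoff : 0 ≤ off) :
    findUnitGo l off = findUnitRef l off :=
  findUnitGo_eq_aux l.length l rfl off hoff

-- ===== VERDICT (by name: the statement is the Claim_ definition above) =====
theorem findUnit_spec : Claim_equal_findUnit := by
  intro s _
  unfold Spec_findUnit findUnit findUnit_alt
  rw [findUnitLoopA_eq _ _ _ _ (Or.inl rfl) le_rfl, findUnitGo_eq _ _ le_rfl]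
  simp [findUnitRef]
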